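-- pv_equiv track=rewrite | github.com/opengauss-mirror/openGauss-server | src/gausskernel/dbmind/tools/components/xtuner/tuner/main.py | check_path_valid
-- ===== SOURCE A (Python) =====
-- def check_path_valid(path):
--     path_check_list = [' ', '|', ';', '&', '$', '<', '>', '`', '\\',
--                        '\'', '"', '{', '}', '(', ')', '[', ']', '~',
--                        '*', '?', '!', '\n']
--
--     if path.strip() == '':
--         return True
--
--     for char in path_check_list:
--         if path.find(char) >= 0:
--             return False
--
--     return True
-- ===== SOURCE B (Python) =====
-- _FORBIDDEN = frozenset([' ', '|', ';', '&', '$', '<', '>', '`', '\\',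
--                         '\'', '"', '{', '}', '(', ')', '[', ']', '~',
--                         '*', '?', '!', '\n'])
--
--
-- def check_path_valid(path):
--     if path.strip() == '':
--         return True
--     return not any(c in _FORBIDDEN for c in path)
-- ===== Notes on version B (the rewrite author's own statement) =====
-- stated objective: idiomatic
-- what changed: Instead of scanning the whole path once per forbidden character (22 full find passes), B makes a single pass over the path's characters testing each against a frozenset of forbidden characters.
import Mathlib
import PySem

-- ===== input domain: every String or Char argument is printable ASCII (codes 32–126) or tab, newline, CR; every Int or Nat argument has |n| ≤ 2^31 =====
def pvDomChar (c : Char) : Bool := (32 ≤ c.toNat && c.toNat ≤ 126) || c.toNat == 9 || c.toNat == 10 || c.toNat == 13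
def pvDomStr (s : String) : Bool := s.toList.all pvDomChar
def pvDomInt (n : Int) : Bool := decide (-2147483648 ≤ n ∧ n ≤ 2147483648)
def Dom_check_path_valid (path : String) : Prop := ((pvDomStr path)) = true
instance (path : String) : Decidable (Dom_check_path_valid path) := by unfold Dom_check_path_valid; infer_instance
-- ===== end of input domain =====

-- B replaces A's per-forbidden-character scans (one path.find per entry) by one pass over the
-- path's own characters against a set of the forbidden characters (objective: idiomatic).

-- ===== PORT A =====
-- the fixed path_check_list, as one-character strings
def pvCheckList : List String :=
  [" ", "|", ";", "&", "$", "<", ">", "`", "\\",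
   "'", "\"", "{", "}", "(", ")", "[", "]", "~",
   "*", "?", "!", "\n"]

-- the 'for char in path_check_list' loop with its early 'return False'
def pvLoopA (l : List String) (path : String) : Bool :=
  match l with
  | [] => true
  | c :: rest => if PySem.Str.find path c ≥ 0 then false else pvLoopA rest path

def check_path_valid (path : String) : Bool :=
  if PySem.Str.strip path = "" then true
  else pvLoopA pvCheckList path

-- ===== PORT B =====
-- the frozenset of forbidden characters (all distinct, so its element list is this)
def pvForbiddenChars : List Char :=
  [' ', '|', ';', '&', '$', '<', '>', '`', '\\',
   '\'', '"', '{', '}', '(', ')', '[', ']', '~',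
   '*', '?', '!', '\n']

def check_path_valid_alt (path : String) : Bool :=
  if PySem.Str.strip path = "" then true
  else ! path.toList.any (fun c => pvForbiddenChars.contains c)

-- ===== PRECONDITION & SPEC =====
def Spec_check_path_valid (path : String) (out : Bool) : Prop := out = check_path_valid_alt path
instance (path : String) (out : Bool) : Decidable (Spec_check_path_valid path out) := by unfold Spec_check_path_valid; infer_instance

-- ===== CLAIM (what is proved, stated in full; the proofs are below) =====
def Claim_equal_check_path_valid : Prop := ∀ (path : String), Dom_check_path_valid path → Spec_check_path_valid path (check_path_valid path)

-- ===== LEMMAS AND PROOFS =====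

-- A's list is B's character set, as one-character strings
lemma pvCheckList_eq : pvCheckList = pvForbiddenChars.map (fun ch => String.ofList [ch]) := by
  decide

-- A's loop over the forbidden list returns true iff no listed string occurs in the path
lemma pvLoopA_eq_all (l : List String) (path : String) :
    pvLoopA l path = l.all (fun c => !(decide (c.toList <:+: path.toList))) := by
  induction l with
  | nil => rfl
  | cons c rest ih =>
      simp only [pvLoopA, List.all_cons, ih]
      by_cases h : PySem.Str.find path c ≥ 0
      · rw [if_pos h]
        have : c.toList <:+: path.toList := (PySem.Str.find_nonneg_iff path c).mp (ge_iff_le.mp h)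
        simp [this]
      · rw [if_neg h]
        have : ¬ c.toList <:+: path.toList := fun hi =>
          h (ge_iff_le.mpr ((PySem.Str.find_nonneg_iff path c).mpr hi))
        simp [this]

-- a one-character string occurs in s iff its character is one of s's characters
lemma pvSingleton_infix_iff (ch : Char) (s : List Char) : [ch] <:+: s ↔ ch ∈ s := by
  constructor
  · rintro ⟨p, q, rfl⟩; simp
  · intro h
    obtain ⟨p, q, rfl⟩ := List.append_of_mem h
    exact ⟨p, q, by simp⟩

-- 'no forbidden character occurs in the path' = 'no path character is forbidden'
lemma pvAll_eq_not_any (L s : List Char) :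
    (L.map (fun ch => String.ofList [ch])).all (fun c => !(decide (c.toList <:+: s))) =
      ! s.any (fun c => L.contains c) := by
  simp only [List.all_map, Function.comp_def, String.toList_ofList, pvSingleton_infix_iff]
  cases hb : s.any (fun c => L.contains c) with
  | true =>
      obtain ⟨c, hc, hcl⟩ := List.any_eq_true.mp hb
      rw [List.contains_eq_mem, decide_eq_true_iff] at hcl
      simp only [Bool.not_true]
      exact List.all_eq_false.mpr ⟨c, hcl, by simp [hc]⟩
  | false =>
      have hb' := List.any_eq_false.mp hb
      simp only [Bool.not_false]
      refine List.all_eq_true.mpr fun ch hch => ?_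
      simp only [Bool.not_eq_true', decide_eq_false_iff_not]
      intro hmem
      exact hb' ch hmem (by simpa [List.contains_eq_mem] using hch)

-- ===== VERDICT (by name: the statement is the Claim_ definition above) =====
theorem check_path_valid_spec : Claim_equal_check_path_valid := by
  intro path _
  show check_path_valid path = check_path_valid_alt path
  unfold check_path_valid check_path_valid_alt
  by_cases hstrip : PySem.Str.strip path = ""
  · simp [hstrip]
  · simp only [hstrip, if_false]
    rw [pvLoopA_eq_all, pvCheckList_eq, pvAll_eq_not_any]
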